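-- pv_equiv track=rewrite | github.com/Yiskah-S/farm-merge-raffles-public | scripts/export-wins-by-day.py | build_day_output
-- ===== SOURCE A (Python) =====
-- def format_username(name):
--     return f"u/[{name}](https://www.reddit.com/user/{name}/)"
--
-- def build_day_output(day_key, items):
--     lines = [f"## {day_key}"]
--     current_winner = None
--     first_group = True
--     for winner_name, sticker, url in items:
--         if winner_name != current_winner:
--             if not first_group:
--                 lines.append("")
--             first_group = False
--             current_winner = winner_name
--             lines.append(format_username(winner_name))
--         lines.append(f"[{sticker}]({url})")
--     lines.append("")
--     return "\n".join(lines)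
-- ===== SOURCE B (Python) =====
-- def format_username(name):
--     return f"u/[{name}](https://www.reddit.com/user/{name}/)"
--
-- def build_day_output(day_key, items):
--     # Split items into maximal runs of the same winner, render each run as one
--     # block string, then join blocks with a blank line between them.
--     blocks = []
--     rest = list(items)
--     while rest:
--         w = rest[0][0]
--         run = []
--         while rest and rest[0][0] == w:
--             run.append(rest.pop(0))
--         block = [format_username(w)] + [f"[{s}]({u})" for _, s, u in run]
--         blocks.append("\n".join(block))
--     if not blocks:
--         return f"## {day_key}\n"
--     return f"## {day_key}\n" + "\n\n".join(blocks) + "\n"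
-- ===== Notes on version B (the rewrite author's own statement) =====
-- stated objective: alternative
-- what changed: B first splits the items into maximal consecutive runs of the same winner, renders each run as one self-contained block string, and joins the blocks with blank-line separators, instead of A's single pass that threads current_winner/first_group state flags while appending individual lines.
import Mathlib
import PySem

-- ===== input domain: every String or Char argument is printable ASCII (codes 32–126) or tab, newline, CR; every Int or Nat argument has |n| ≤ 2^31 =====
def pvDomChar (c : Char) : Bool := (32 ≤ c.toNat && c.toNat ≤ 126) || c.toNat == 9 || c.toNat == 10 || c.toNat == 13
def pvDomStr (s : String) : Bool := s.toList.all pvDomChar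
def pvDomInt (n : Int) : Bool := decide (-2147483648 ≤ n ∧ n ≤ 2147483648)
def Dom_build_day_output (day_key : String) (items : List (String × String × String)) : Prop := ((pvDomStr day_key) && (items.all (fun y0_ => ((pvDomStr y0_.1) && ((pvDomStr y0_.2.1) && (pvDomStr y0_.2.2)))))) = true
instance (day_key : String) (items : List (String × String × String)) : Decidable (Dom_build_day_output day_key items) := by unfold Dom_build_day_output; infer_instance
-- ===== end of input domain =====

-- B groups the items into maximal runs of the same winner and joins per-run block
-- strings with blank-line separators, replacing A's stateful one-pass line appender
-- (objective: a more idiomatic decomposition; same cost).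

-- ===== PORT A =====
def format_username (name : String) : String :=
  "u/[" ++ name ++ "](https://www.reddit.com/user/" ++ name ++ "/)"

-- f"[{sticker}]({url})" (shared literal f-string of both Pythons)
def stickerLine (s u : String) : String := "[" ++ s ++ "](" ++ u ++ ")"

-- one iteration of A's for-loop over (lines, current_winner, first_group)
def pvStep (st : List String × Option String × Bool) (it : String × String × String) :
    List String × Option String × Bool :=
  match st, it with
  | (lines, current, first), (w, s, u) =>
    if some w ≠ current then
      (((if !first then lines ++ [""] else lines) ++ [format_username w]) ++ [stickerLine s u],
       some w, false)
    else
      (lines ++ [stickerLine s u], current, first)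

def build_day_output (day_key : String) (items : List (String × String × String)) : String :=
  let st := items.foldl pvStep (["## " ++ day_key], none, true)
  PySem.Str.join "\n" (st.1 ++ [""])

-- ===== PORT B =====
-- B's outer while loop: peel off the maximal run of the leading winner, render it as one block
def pvBlocks : List (String × String × String) → List String
  | [] => []
  | t :: rest =>
    let w := t.1
    let run := t :: rest.takeWhile (fun x => x.1 == w)
    PySem.Str.join "\n" (format_username w :: run.map (fun x => stickerLine x.2.1 x.2.2))
      :: pvBlocks (rest.dropWhile (fun x => x.1 == w))
termination_by xs => xs.length
decreasing_by
  simp only [List.length_cons]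
  exact Nat.lt_succ_of_le (List.length_dropWhile_le _ _)

def build_day_output_alt (day_key : String) (items : List (String × String × String)) : String :=
  let blocks := pvBlocks items
  if blocks.isEmpty then "## " ++ day_key ++ "\n"
  else "## " ++ day_key ++ "\n" ++ PySem.Str.join "\n\n" blocks ++ "\n"

-- ===== PRECONDITION & SPEC =====
def Spec_build_day_output (day_key : String) (items : List (String × String × String)) (out : String) : Prop := out = build_day_output_alt day_key items
instance (day_key : String) (items : List (String × String × String)) (out : String) : Decidable (Spec_build_day_output day_key items out) := by unfold Spec_build_day_output; infer_instance

-- ===== CLAIM (what is proved, stated in full; the proofs are below) =====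
def Claim_equal_build_day_output : Prop := ∀ (day_key : String) (items : List (String × String × String)), Dom_build_day_output day_key items → Spec_build_day_output day_key items (build_day_output day_key items)

-- ===== LEMMAS AND PROOFS =====

-- the per-run line groups A's loop appends (proof-side mirror of pvBlocks, as raw lines)
def pvGroups : List (String × String × String) → List (List String)
  | [] => []
  | t :: rest =>
    (format_username t.1 :: (t :: rest.takeWhile (fun x => x.1 == t.1)).map (fun x => stickerLine x.2.1 x.2.2))
      :: pvGroups (rest.dropWhile (fun x => x.1 == t.1))
termination_by xs => xs.length
decreasing_by
  simp only [List.length_cons]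
  exact Nat.lt_succ_of_le (List.length_dropWhile_le _ _)

-- glue the groups with "" separators; the Bool says whether we are before the first group
def pvSepd : Bool → List (List String) → List String
  | _, [] => []
  | true, g :: gs => g ++ pvSepd false gs
  | false, g :: gs => ("" :: g) ++ pvSepd false gs

lemma pvBlocks_eq_map : ∀ (items : List (String × String × String)),
    pvBlocks items = (pvGroups items).map (PySem.Str.join "\n")
  | [] => by simp [pvBlocks, pvGroups]
  | t :: rest => by
    obtain ⟨w, s, u⟩ := t
    rw [pvBlocks, pvGroups, List.map_cons, pvBlocks_eq_map (rest.dropWhile (fun x => x.1 == w))]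
    simp
termination_by items => items.length
decreasing_by
  simp only [List.length_cons]
  exact Nat.lt_succ_of_le (List.length_dropWhile_le _ _)

lemma pvFold_run (run : List (String × String × String)) (w : String)
    (h : ∀ x ∈ run, x.1 = w) (lines : List String) :
    List.foldl pvStep (lines, some w, false) run
      = (lines ++ run.map (fun x => stickerLine x.2.1 x.2.2), some w, false) := by
  induction run generalizing lines with
  | nil => simp
  | cons x xs ih =>
    obtain ⟨xw, xsk, xu⟩ := x
    have hx : xw = w := h _ (List.mem_cons_self)
    subst hx
    rw [List.foldl_cons]
    have hstep : pvStep (lines, some xw, false) (xw, xsk, xu)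
        = (lines ++ [stickerLine xsk xu], some xw, false) := by
      simp [pvStep]
    rw [hstep, ih (fun y hy => h y (List.mem_cons_of_mem _ hy))]
    simp

lemma pvFold_char : ∀ (items : List (String × String × String)) (lines : List String)
    (cur : Option String) (first : Bool),
    (∀ t r, items = t :: r → some t.1 ≠ cur) →
    (List.foldl pvStep (lines, cur, first) items).1 = lines ++ pvSepd first (pvGroups items)
  | [], lines, cur, first, _ => by simp [pvGroups, pvSepd]
  | t :: rest, lines, cur, first, h => by
    obtain ⟨w, s, u⟩ := t
    have hcur : some w ≠ cur := h _ _ rfl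
    have hstep : pvStep (lines, cur, first) (w, s, u)
        = (((if !first then lines ++ [""] else lines) ++ [format_username w]) ++ [stickerLine s u],
           some w, false) := by
      simp [pvStep, hcur]
    rw [List.foldl_cons, hstep,
        ← List.takeWhile_append_dropWhile (p := fun x => x.1 == w) (l := rest),
        List.foldl_append,
        pvFold_run _ w (fun x hx => by simpa using List.mem_takeWhile_imp hx),
        pvFold_char (rest.dropWhile (fun x => x.1 == w)) _ (some w) false (by
          intro a r hr hcontra
          have hne : rest.dropWhile (fun x => x.1 == w) ≠ [] := by simp [hr]
          have := List.head_dropWhile_not (fun (x : String × String × String) => x.1 == w) hne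
          simp only [hr, List.head_cons] at this
          simp at this
          exact this (by simpa using hcontra)),
        pvGroups]
    cases first <;> simp [pvSepd, List.append_assoc]
termination_by items => items.length
decreasing_by
  simp only [List.length_cons]
  exact Nat.lt_succ_of_le (List.length_dropWhile_le _ _)

-- char-level mirror of pvSepd (separator "" becomes [])
def pvSepdC : Bool → List (List (List Char)) → List (List Char)
  | _, [] => []
  | true, g :: gs => g ++ pvSepdC false gs
  | false, g :: gs => ([] :: g) ++ pvSepdC false gs

lemma pvSepdC_false_cons (a : List (List Char)) (L : List (List (List Char))) :
    pvSepdC false (a :: L) = [] :: pvSepdC true (a :: L) := by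
  simp [pvSepdC]

lemma map_toList_sepd (b : Bool) (G : List (List String)) :
    (pvSepd b G).map String.toList = pvSepdC b (G.map (fun g => g.map String.toList)) := by
  induction G generalizing b with
  | nil => cases b <;> simp [pvSepd, pvSepdC]
  | cons g gs ih => cases b <;> simp [pvSepd, pvSepdC, ih false]

lemma pvGroups_shape : ∀ (items : List (String × String × String)) (g : List String),
    g ∈ pvGroups items → g ≠ []
  | [], g, hg => by simp [pvGroups] at hg
  | t :: rest, g, hg => by
    obtain ⟨w, s, u⟩ := t
    rw [pvGroups] at hg
    rcases List.mem_cons.mp hg with h | h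
    · subst h; simp
    · exact pvGroups_shape (rest.dropWhile (fun x => x.1 == w)) g h
termination_by items => items.length
decreasing_by
  simp only [List.length_cons]
  exact Nat.lt_succ_of_le (List.length_dropWhile_le _ _)

lemma join_trailing : ∀ (L : List (List Char)) (x : List Char),
    PySem.Chars.join ['\n'] (x :: (L ++ [[]])) = PySem.Chars.join ['\n'] (x :: L) ++ ['\n']
  | [], x => by
    simp [PySem.Chars.join_cons_cons, PySem.Chars.join_singleton]
  | y :: L, x => by
    simp only [List.cons_append]
    rw [PySem.Chars.join_cons_cons, join_trailing L y, PySem.Chars.join_cons_cons]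
    simp

lemma join_blank_sep : ∀ (g : List (List Char)) (x : List Char) (M : List (List Char)), M ≠ [] →
    PySem.Chars.join ['\n'] (x :: (g ++ [] :: M))
      = PySem.Chars.join ['\n'] (x :: g) ++ '\n' :: '\n' :: PySem.Chars.join ['\n'] M
  | [], x, M, hM => by
    obtain ⟨m, M', rfl⟩ := List.exists_cons_of_ne_nil hM
    rw [List.nil_append, PySem.Chars.join_cons_cons, PySem.Chars.join_cons_cons,
        PySem.Chars.join_singleton]
    simp
  | y :: g', x, M, hM => by
    simp only [List.cons_append]
    rw [PySem.Chars.join_cons_cons, join_blank_sep g' y M hM, PySem.Chars.join_cons_cons]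
    simp

lemma join_sepdC : ∀ (G : List (List (List Char))), (∀ g ∈ G, g ≠ []) → G ≠ [] →
    PySem.Chars.join ['\n'] (pvSepdC true G)
      = PySem.Chars.join ['\n', '\n'] (G.map (PySem.Chars.join ['\n']))
  | [], _, hG => absurd rfl hG
  | [g], hne, _ => by simp [pvSepdC, PySem.Chars.join_singleton]
  | g :: g' :: G', hne, _ => by
    have hg : g ≠ [] := hne g (by simp)
    have hg' : g' ≠ [] := hne g' (by simp)
    obtain ⟨a, t, rfl⟩ := List.exists_cons_of_ne_nil hg
    have hM : pvSepdC true (g' :: G') ≠ [] := by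
      obtain ⟨b, tb, rfl⟩ := List.exists_cons_of_ne_nil hg'
      simp [pvSepdC]
    have hshape : pvSepdC true ((a :: t) :: g' :: G')
        = a :: (t ++ [] :: pvSepdC true (g' :: G')) := by
      rw [show pvSepdC true ((a :: t) :: g' :: G')
            = (a :: t) ++ pvSepdC false (g' :: G') from rfl, pvSepdC_false_cons]
      simp
    rw [hshape, join_blank_sep t a _ hM,
        join_sepdC (g' :: G') (fun x hx => hne x (List.mem_cons_of_mem _ hx)) (by simp)]
    simp only [List.map_cons]
    rw [PySem.Chars.join_cons_cons]
    simp

lemma pv_assemble (H : List Char) (gls : List (List (List Char)))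
    (hne : gls ≠ []) (hshape : ∀ g ∈ gls, g ≠ []) :
    PySem.Chars.join ['\n'] (H :: (pvSepdC true gls ++ [[]]))
      = H ++ '\n' :: (PySem.Chars.join ['\n', '\n'] (gls.map (PySem.Chars.join ['\n'])) ++ ['\n']) := by
  obtain ⟨gl, gls', rfl⟩ := List.exists_cons_of_ne_nil hne
  obtain ⟨a, t, rfl⟩ := List.exists_cons_of_ne_nil (hshape gl List.mem_cons_self)
  rw [join_trailing]
  have hS : pvSepdC true ((a :: t) :: gls') = a :: (t ++ pvSepdC false gls') := by
    simp [pvSepdC]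
  rw [hS, PySem.Chars.join_cons_cons, ← hS,
      join_sepdC _ hshape (by simp)]
  simp

-- ===== VERDICT (by name: the statement is the Claim_ definition above) =====
theorem build_day_output_spec : Claim_equal_build_day_output := by
  unfold Claim_equal_build_day_output
  intro day_key items _
  show build_day_output day_key items = build_day_output_alt day_key items
  cases items with
  | nil =>
    apply String.toList_inj.mp
    simp [build_day_output, build_day_output_alt, pvBlocks, PySem.Str.toList_join,
          PySem.Chars.join_cons_cons, PySem.Chars.join_singleton, String.toList_append]
  | cons t rest =>
    apply String.toList_inj.mp
    obtain ⟨w, s, u⟩ := t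
    have hfold := pvFold_char ((w, s, u) :: rest) ["## " ++ day_key] none true
      (by intro a r _; simp)
    have hGshape : pvGroups ((w, s, u) :: rest)
        = (format_username w :: ((w, s, u) :: rest.takeWhile (fun x => x.1 == w)).map
            (fun x => stickerLine x.2.1 x.2.2))
          :: pvGroups (rest.dropWhile (fun x => x.1 == w)) := by rw [pvGroups]
    have hglsne : (pvGroups ((w, s, u) :: rest)).map (fun g => g.map String.toList) ≠ [] := by
      rw [hGshape]; simp
    have hglsshape : ∀ g ∈ (pvGroups ((w, s, u) :: rest)).map (fun g => g.map String.toList),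
        g ≠ [] := by
      intro g hgmem
      obtain ⟨g0, hg0, rfl⟩ := List.mem_map.mp hgmem
      have := pvGroups_shape _ _ hg0
      simpa using this
    have hA : (build_day_output day_key ((w, s, u) :: rest)).toList
        = ("## " ++ day_key).toList ++ '\n'
            :: (PySem.Chars.join ['\n', '\n']
                  (((pvGroups ((w, s, u) :: rest)).map (fun g => g.map String.toList)).map
                    (PySem.Chars.join ['\n'])) ++ ['\n']) := by
      rw [build_day_output]
      simp only [PySem.Str.toList_join, hfold]
      rw [show ("\n" : String).toList = ['\n'] by decide]
      rw [show List.map String.toList ((["## " ++ day_key] ++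
              pvSepd true (pvGroups ((w, s, u) :: rest))) ++ [""])
            = ("## " ++ day_key).toList
                :: (pvSepdC true ((pvGroups ((w, s, u) :: rest)).map
                      (fun g => g.map String.toList)) ++ [[]]) by
          simp [map_toList_sepd]]
      exact pv_assemble _ _ hglsne hglsshape
    have hBne : ((pvBlocks ((w, s, u) :: rest)).isEmpty) = false := by
      rw [pvBlocks]; simp
    have hB : (build_day_output_alt day_key ((w, s, u) :: rest)).toList
        = ("## " ++ day_key).toList ++ '\n'
            :: (PySem.Chars.join ['\n', '\n']
                  (((pvGroups ((w, s, u) :: rest)).map (fun g => g.map String.toList)).map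
                    (PySem.Chars.join ['\n'])) ++ ['\n']) := by
      rw [build_day_output_alt]
      simp only [hBne, Bool.false_eq_true, if_false]
      rw [pvBlocks_eq_map]
      simp only [String.toList_append, PySem.Str.toList_join, List.map_map]
      rw [show ("\n\n" : String).toList = ['\n', '\n'] by decide,
          show ("\n" : String).toList = ['\n'] by decide]
      simp [Function.comp_def, PySem.Str.toList_join,
            show ("\n" : String).toList = ['\n'] by decide]
    rw [hA, hB]
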